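-- pv_equiv track=rewrite | github.com/danila-suvorov/System-for-searching-products-in-online-stores-by-their-photo-images | ParserWildberries.py | find_basket
-- ===== SOURCE A (Python) =====
-- def find_basket(product_id):
--     vol = product_id // 100000
--     baskets = [
--         (0, 143, "01"), (144, 287, "02"), (288, 431, "03"),
--         (432, 719, "04"), (720, 1007, "05"), (1008, 1061, "06"),
--         (1062, 1115, "07"), (1116, 1169, "08"), (1170, 1313, "09"),
--         (1314, 1601, "10"), (1602, 1655, "11"), (1656, 1919, "12"),
--         (1920, 2045, "13")
--     ]
--     for start, end, code in baskets:
--         if start <= vol <= end: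
--             return code
--     return "01"
-- ===== SOURCE B (Python) =====
-- import bisect
--
-- _STARTS = [0, 144, 288, 432, 720, 1008, 1062, 1116, 1170, 1314, 1602, 1656, 1920]
-- _CODES = ["01", "02", "03", "04", "05", "06", "07", "08", "09", "10", "11", "12", "13"]
--
-- def find_basket(product_id):
--     vol = product_id // 100000
--     if vol < 0 or vol > 2045:
--         return "01"
--     return _CODES[bisect.bisect_right(_STARTS, vol) - 1]
-- ===== Notes on version B (the rewrite author's own statement) =====
-- stated objective: idiomatic
-- what changed: Replaced the linear scan over the (start,end,code) range tuples with a single binary search (bisect_right) over the sorted start boundaries plus an explicit out-of-range check, indexing into a parallel code table.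
import Mathlib
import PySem

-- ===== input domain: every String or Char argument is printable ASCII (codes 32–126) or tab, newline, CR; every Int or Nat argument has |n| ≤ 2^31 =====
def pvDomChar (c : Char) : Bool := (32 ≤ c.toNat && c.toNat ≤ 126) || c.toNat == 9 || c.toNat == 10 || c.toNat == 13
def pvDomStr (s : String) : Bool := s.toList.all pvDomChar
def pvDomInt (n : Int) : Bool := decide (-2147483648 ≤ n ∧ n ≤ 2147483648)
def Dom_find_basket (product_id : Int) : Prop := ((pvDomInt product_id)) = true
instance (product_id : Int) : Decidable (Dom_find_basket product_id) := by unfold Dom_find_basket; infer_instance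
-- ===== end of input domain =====

-- B replaces A's linear scan over the range tuples with a bisect_right binary search over the start boundaries (idiomatic table lookup); same outputs.

-- ===== PORT A =====
def pvBaskets : List (Int × Int × String) :=
  [(0, 143, "01"), (144, 287, "02"), (288, 431, "03"),
   (432, 719, "04"), (720, 1007, "05"), (1008, 1061, "06"),
   (1062, 1115, "07"), (1116, 1169, "08"), (1170, 1313, "09"),
   (1314, 1601, "10"), (1602, 1655, "11"), (1656, 1919, "12"),
   (1920, 2045, "13")]

def pvFindLoop (vol : Int) : List (Int × Int × String) → String
  | [] => "01"
  | (s, e, c) :: rest => if s ≤ vol ∧ vol ≤ e then c else pvFindLoop vol rest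

def find_basket (product_id : Int) : String :=
  pvFindLoop (PySem.Int.floordiv product_id 100000) pvBaskets

-- ===== PORT B =====
def pvStarts : List Int := [0, 144, 288, 432, 720, 1008, 1062, 1116, 1170, 1314, 1602, 1656, 1920]
def pvCodes : List String := ["01", "02", "03", "04", "05", "06", "07", "08", "09", "10", "11", "12", "13"]

-- hand-written bisect_right (the loop of Python's bisect.bisect_right), exact on in-range indices
def pvBisectRight (a : List Int) (x : Int) (lo hi : Nat) : Nat :=
  if h : lo < hi then
    let mid := (lo + hi) / 2
    if x < a.getD mid 0 then pvBisectRight a x lo mid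
    else pvBisectRight a x (mid + 1) hi
  else lo
termination_by hi - lo
decreasing_by all_goals omega

def find_basket_alt (product_id : Int) : String :=
  let vol := PySem.Int.floordiv product_id 100000
  if vol < 0 ∨ vol > 2045 then "01"
  else (PySem.List.pyGet? pvCodes ((pvBisectRight pvStarts vol 0 pvStarts.length : Int) - 1)).getD ""

-- ===== PRECONDITION & SPEC =====
def Spec_find_basket (product_id : Int) (out : String) : Prop := out = find_basket_alt product_id
instance (product_id : Int) (out : String) : Decidable (Spec_find_basket product_id out) := by unfold Spec_find_basket; infer_instance

-- ===== CLAIM (what is proved, stated in full; the proofs are below) =====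
def Claim_equal_find_basket : Prop := ∀ (product_id : Int), Dom_find_basket product_id → Spec_find_basket product_id (find_basket product_id)

-- ===== LEMMAS AND PROOFS =====
theorem pvFindLoop_nil (vol : Int) : pvFindLoop vol [] = "01" := rfl

theorem pvFindLoop_cons (vol s e : Int) (c : String) (rest : List (Int × Int × String)) :
    pvFindLoop vol ((s, e, c) :: rest) = if s ≤ vol ∧ vol ≤ e then c else pvFindLoop vol rest := rfl

set_option maxHeartbeats 1000000 in
theorem pv_core (v : Int) : pvFindLoop v pvBaskets =
    (if v < 0 ∨ v > 2045 then "01"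
     else (PySem.List.pyGet? pvCodes ((pvBisectRight pvStarts v 0 pvStarts.length : Int) - 1)).getD "") := by
  simp only [pvBaskets]
  by_cases h : v < 0 ∨ v > 2045
  · rw [if_pos h]
    rw [pvFindLoop_cons, if_neg (by omega)]; rw [pvFindLoop_cons, if_neg (by omega)]; rw [pvFindLoop_cons, if_neg (by omega)]; rw [pvFindLoop_cons, if_neg (by omega)]; rw [pvFindLoop_cons, if_neg (by omega)]; rw [pvFindLoop_cons, if_neg (by omega)]; rw [pvFindLoop_cons, if_neg (by omega)]; rw [pvFindLoop_cons, if_neg (by omega)]; rw [pvFindLoop_cons, if_neg (by omega)]; rw [pvFindLoop_cons, if_neg (by omega)]; rw [pvFindLoop_cons, if_neg (by omega)]; rw [pvFindLoop_cons, if_neg (by omega)]; rw [pvFindLoop_cons, if_neg (by omega)]; exact pvFindLoop_nil v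
  · rw [if_neg h]
    by_cases h0 : v ≤ 143
    · rw [pvFindLoop_cons, if_pos (by omega)]
      repeat' first
        | omega
        | decide
        | (rw [pvBisectRight.eq_def]; try norm_num [pvStarts]; try split_ifs)
    by_cases h1 : v ≤ 287
    · rw [pvFindLoop_cons, if_neg (by omega)]; rw [pvFindLoop_cons, if_pos (by omega)]
      repeat' first
        | omega
        | decide
        | (rw [pvBisectRight.eq_def]; try norm_num [pvStarts]; try split_ifs)
    by_cases h2 : v ≤ 431
    · rw [pvFindLoop_cons, if_neg (by omega)]; rw [pvFindLoop_cons, if_neg (by omega)]; rw [pvFindLoop_cons, if_pos (by omega)]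
      repeat' first
        | omega
        | decide
        | (rw [pvBisectRight.eq_def]; try norm_num [pvStarts]; try split_ifs)
    by_cases h3 : v ≤ 719
    · rw [pvFindLoop_cons, if_neg (by omega)]; rw [pvFindLoop_cons, if_neg (by omega)]; rw [pvFindLoop_cons, if_neg (by omega)]; rw [pvFindLoop_cons, if_pos (by omega)]
      repeat' first
        | omega
        | decide
        | (rw [pvBisectRight.eq_def]; try norm_num [pvStarts]; try split_ifs)
    by_cases h4 : v ≤ 1007
    · rw [pvFindLoop_cons, if_neg (by omega)]; rw [pvFindLoop_cons, if_neg (by omega)]; rw [pvFindLoop_cons, if_neg (by omega)]; rw [pvFindLoop_cons, if_neg (by omega)]; rw [pvFindLoop_cons, if_pos (by omega)]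
      repeat' first
        | omega
        | decide
        | (rw [pvBisectRight.eq_def]; try norm_num [pvStarts]; try split_ifs)
    by_cases h5 : v ≤ 1061
    · rw [pvFindLoop_cons, if_neg (by omega)]; rw [pvFindLoop_cons, if_neg (by omega)]; rw [pvFindLoop_cons, if_neg (by omega)]; rw [pvFindLoop_cons, if_neg (by omega)]; rw [pvFindLoop_cons, if_neg (by omega)]; rw [pvFindLoop_cons, if_pos (by omega)]
      repeat' first
        | omega
        | decide
        | (rw [pvBisectRight.eq_def]; try norm_num [pvStarts]; try split_ifs)
    by_cases h6 : v ≤ 1115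
    · rw [pvFindLoop_cons, if_neg (by omega)]; rw [pvFindLoop_cons, if_neg (by omega)]; rw [pvFindLoop_cons, if_neg (by omega)]; rw [pvFindLoop_cons, if_neg (by omega)]; rw [pvFindLoop_cons, if_neg (by omega)]; rw [pvFindLoop_cons, if_neg (by omega)]; rw [pvFindLoop_cons, if_pos (by omega)]
      repeat' first
        | omega
        | decide
        | (rw [pvBisectRight.eq_def]; try norm_num [pvStarts]; try split_ifs)
    by_cases h7 : v ≤ 1169
    · rw [pvFindLoop_cons, if_neg (by omega)]; rw [pvFindLoop_cons, if_neg (by omega)]; rw [pvFindLoop_cons, if_neg (by omega)]; rw [pvFindLoop_cons, if_neg (by omega)]; rw [pvFindLoop_cons, if_neg (by omega)]; rw [pvFindLoop_cons, if_neg (by omega)]; rw [pvFindLoop_cons, if_neg (by omega)]; rw [pvFindLoop_cons, if_pos (by omega)]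
      repeat' first
        | omega
        | decide
        | (rw [pvBisectRight.eq_def]; try norm_num [pvStarts]; try split_ifs)
    by_cases h8 : v ≤ 1313
    · rw [pvFindLoop_cons, if_neg (by omega)]; rw [pvFindLoop_cons, if_neg (by omega)]; rw [pvFindLoop_cons, if_neg (by omega)]; rw [pvFindLoop_cons, if_neg (by omega)]; rw [pvFindLoop_cons, if_neg (by omega)]; rw [pvFindLoop_cons, if_neg (by omega)]; rw [pvFindLoop_cons, if_neg (by omega)]; rw [pvFindLoop_cons, if_neg (by omega)]; rw [pvFindLoop_cons, if_pos (by omega)]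
      repeat' first
        | omega
        | decide
        | (rw [pvBisectRight.eq_def]; try norm_num [pvStarts]; try split_ifs)
    by_cases h9 : v ≤ 1601
    · rw [pvFindLoop_cons, if_neg (by omega)]; rw [pvFindLoop_cons, if_neg (by omega)]; rw [pvFindLoop_cons, if_neg (by omega)]; rw [pvFindLoop_cons, if_neg (by omega)]; rw [pvFindLoop_cons, if_neg (by omega)]; rw [pvFindLoop_cons, if_neg (by omega)]; rw [pvFindLoop_cons, if_neg (by omega)]; rw [pvFindLoop_cons, if_neg (by omega)]; rw [pvFindLoop_cons, if_neg (by omega)]; rw [pvFindLoop_cons, if_pos (by omega)]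
      repeat' first
        | omega
        | decide
        | (rw [pvBisectRight.eq_def]; try norm_num [pvStarts]; try split_ifs)
    by_cases h10 : v ≤ 1655
    · rw [pvFindLoop_cons, if_neg (by omega)]; rw [pvFindLoop_cons, if_neg (by omega)]; rw [pvFindLoop_cons, if_neg (by omega)]; rw [pvFindLoop_cons, if_neg (by omega)]; rw [pvFindLoop_cons, if_neg (by omega)]; rw [pvFindLoop_cons, if_neg (by omega)]; rw [pvFindLoop_cons, if_neg (by omega)]; rw [pvFindLoop_cons, if_neg (by omega)]; rw [pvFindLoop_cons, if_neg (by omega)]; rw [pvFindLoop_cons, if_neg (by omega)]; rw [pvFindLoop_cons, if_pos (by omega)]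
      repeat' first
        | omega
        | decide
        | (rw [pvBisectRight.eq_def]; try norm_num [pvStarts]; try split_ifs)
    by_cases h11 : v ≤ 1919
    · rw [pvFindLoop_cons, if_neg (by omega)]; rw [pvFindLoop_cons, if_neg (by omega)]; rw [pvFindLoop_cons, if_neg (by omega)]; rw [pvFindLoop_cons, if_neg (by omega)]; rw [pvFindLoop_cons, if_neg (by omega)]; rw [pvFindLoop_cons, if_neg (by omega)]; rw [pvFindLoop_cons, if_neg (by omega)]; rw [pvFindLoop_cons, if_neg (by omega)]; rw [pvFindLoop_cons, if_neg (by omega)]; rw [pvFindLoop_cons, if_neg (by omega)]; rw [pvFindLoop_cons, if_neg (by omega)]; rw [pvFindLoop_cons, if_pos (by omega)]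
      repeat' first
        | omega
        | decide
        | (rw [pvBisectRight.eq_def]; try norm_num [pvStarts]; try split_ifs)
    · rw [pvFindLoop_cons, if_neg (by omega)]; rw [pvFindLoop_cons, if_neg (by omega)]; rw [pvFindLoop_cons, if_neg (by omega)]; rw [pvFindLoop_cons, if_neg (by omega)]; rw [pvFindLoop_cons, if_neg (by omega)]; rw [pvFindLoop_cons, if_neg (by omega)]; rw [pvFindLoop_cons, if_neg (by omega)]; rw [pvFindLoop_cons, if_neg (by omega)]; rw [pvFindLoop_cons, if_neg (by omega)]; rw [pvFindLoop_cons, if_neg (by omega)]; rw [pvFindLoop_cons, if_neg (by omega)]; rw [pvFindLoop_cons, if_neg (by omega)]; rw [pvFindLoop_cons, if_pos (by omega)]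
      repeat' first
        | omega
        | decide
        | (rw [pvBisectRight.eq_def]; try norm_num [pvStarts]; try split_ifs)

-- ===== VERDICT (by name: the statement is the Claim_ definition above) =====
theorem find_basket_spec : Claim_equal_find_basket := by
  intro pid _
  unfold Spec_find_basket find_basket find_basket_alt
  exact pv_core _
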